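-- pv_equiv track=rewrite | github.com/iamywl/cotest | cotest/groom/07_02_sol.py | run_example
-- ===== SOURCE A (Python) =====
-- def run_example(s_str):
--     n = len(s_str)
--     dp = [0] * n
--     stack = []
--     total_count = 0
--     for i in range(n):
--         if s_str[i] == '(':
--             stack.append(i)
--         elif s_str[i] == ')':
--             if stack:
--                 j = stack.pop()
--                 count_at_prev = dp[j-1] if j > 0 else 0
--                 dp[i] = 1 + count_at_prev
--                 total_count += dp[i]
--     return total_count
-- ===== SOURCE B (Python) =====
-- def run_example(s_str):
--     stack = []
--     cur = 0
--     total = 0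
--     for c in s_str:
--         if c == '(':
--             stack.append(cur)
--             cur = 0
--         elif c == ')':
--             if stack:
--                 cur = stack.pop() + 1
--                 total += cur
--             else:
--                 cur = 0
--         else:
--             cur = 0
--     return total
-- ===== Notes on version B (the rewrite author's own statement) =====
-- stated objective: simpler
-- what changed: Replaces the position-indexed dp array and stack of indices with a single accumulator cur (count of valid substrings ending at the current position) and a stack of carry values, removing the O(n) table and all index arithmetic.
import Mathlib
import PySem

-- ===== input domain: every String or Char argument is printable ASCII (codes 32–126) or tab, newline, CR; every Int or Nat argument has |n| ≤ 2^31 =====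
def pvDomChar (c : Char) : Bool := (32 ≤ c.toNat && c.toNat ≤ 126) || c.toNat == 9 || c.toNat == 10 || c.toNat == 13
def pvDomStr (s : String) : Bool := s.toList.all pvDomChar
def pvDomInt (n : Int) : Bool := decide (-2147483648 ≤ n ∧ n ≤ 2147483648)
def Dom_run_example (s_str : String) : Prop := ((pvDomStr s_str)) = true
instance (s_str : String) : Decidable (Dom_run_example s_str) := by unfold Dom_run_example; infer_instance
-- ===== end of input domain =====

-- B replaces A's position-indexed dp array (plus stack of indices) by an accumulator `cur`
-- and a stack of carry values: simpler, no dp table. Equal return value on all inputs.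

-- ===== PORT A =====
-- A's `for i in range(n)` loop, transliterated as structural recursion over the characters
-- carrying the index i; dp is the list (dp[i] = ... via List.set, dp[j-1] via getD, always
-- in range when read: 0 < j and j-1 < n), the stack of indices is kept most-recent-first
-- (Python append/pop at the end).
def loopA : List Char → Nat → List Int → List Nat → Int → Int
  | [], _, _, _, total => total
  | c :: rest, i, dp, stack, total =>
    if c = '(' then loopA rest (i+1) dp (i :: stack) total
    else if c = ')' then
      match stack with
      | [] => loopA rest (i+1) dp [] total
      | j :: stk =>
        let cprev : Int := if 0 < j then dp.getD (j-1) 0 else 0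
        loopA rest (i+1) (dp.set i (1 + cprev)) stk (total + (1 + cprev))
    else loopA rest (i+1) dp stack total

def run_example (s_str : String) : Int :=
  loopA s_str.toList 0 (List.replicate s_str.toList.length 0) [] 0

-- ===== PORT B =====
-- one fold: state = (stack of carries, cur = count of valid substrings ending here, total)
def altStep (st : List Int × Int × Int) (c : Char) : List Int × Int × Int :=
  if c = '(' then (st.2.1 :: st.1, 0, st.2.2)
  else if c = ')' then
    match st.1 with
    | [] => ([], 0, st.2.2)
    | carry :: rest => (rest, carry + 1, st.2.2 + (carry + 1))
  else (st.1, 0, st.2.2)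

def run_example_alt (s_str : String) : Int :=
  (s_str.toList.foldl altStep ([], 0, 0)).2.2

-- ===== PRECONDITION & SPEC =====
def Spec_run_example (s_str : String) (out : Int) : Prop := out = run_example_alt s_str
instance (s_str : String) (out : Int) : Decidable (Spec_run_example s_str out) := by unfold Spec_run_example; infer_instance

-- ===== CLAIM (what is proved, stated in full; the proofs are below) =====
def Claim_equal_run_example : Prop := ∀ (s_str : String), Dom_run_example s_str → Spec_run_example s_str (run_example s_str)

-- ===== LEMMAS AND PROOFS =====

-- Invariant linking A's state after i steps to B's: B's stack holds, for each index j on A's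
-- stack, the value dp[j-1] (0 if j = 0); cur = dp[i-1] (0 if i = 0); dp is 0 from i on.
lemma loopA_eq_foldl (rest : List Char) :
    ∀ (i : Nat) (dp : List Int) (stackA : List Nat) (total cur : Int) (stkB : List Int),
    dp.length = i + rest.length →
    (∀ j ∈ stackA, j < i) →
    stkB = stackA.map (fun j => if 0 < j then dp.getD (j-1) 0 else 0) →
    cur = (if 0 < i then dp.getD (i-1) 0 else 0) →
    (∀ m, i ≤ m → dp.getD m 0 = 0) →
    loopA rest i dp stackA total = (rest.foldl altStep (stkB, cur, total)).2.2 := by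
  induction rest with
  | nil => intro i dp stackA total cur stkB _ _ _ _ _; simp [loopA]
  | cons c rest ih =>
    intro i dp stackA total cur stkB hlen hlt hstk hcur hzero
    simp only [List.length_cons] at hlen
    by_cases hc1 : c = '('
    · -- push: carry pushed on B's stack is exactly cur = dp[i-1]
      subst hc1
      simp only [loopA, altStep, reduceIte, List.foldl_cons]
      apply ih
      · omega
      · intro j hj
        rcases List.mem_cons.mp hj with rfl | hj'
        · omega
        · exact Nat.lt_succ_of_lt (hlt j hj')
      · simp [hstk, hcur]
      · simpa [List.getD] using (hzero i le_rfl).symm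
      · exact fun m hm => hzero m (by omega)
    · by_cases hc2 : c = ')'
      · subst hc2
        cases stackA with
        | nil =>
          subst hstk
          simp only [loopA, altStep, reduceIte, if_neg hc1, List.foldl_cons, List.map_nil]
          apply ih
          · omega
          · simp
          · simp
          · simpa [List.getD] using (hzero i le_rfl).symm
          · exact fun m hm => hzero m (by omega)
        | cons j stk =>
          have hji : j < i := hlt j (by simp)
          have hilen : i < dp.length := by omega
          subst hstk
          simp only [loopA, altStep, reduceIte, if_neg hc1, List.foldl_cons, List.map_cons]
          rw [show (1 + (if 0 < j then dp.getD (j-1) 0 else 0))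
                = ((if 0 < j then dp.getD (j-1) 0 else 0) + 1) from by ring]
          apply ih
          · simp; omega
          · intro j' hj'; exact Nat.lt_succ_of_lt (hlt j' (by simp [hj']))
          · apply List.map_congr_left
            intro j' hj'
            have hj'i : j' < i := hlt j' (by simp [hj'])
            by_cases h0 : 0 < j'
            · simp only [if_pos h0]
              have hne : i ≠ j' - 1 := by omega
              simp [List.getD, List.getElem?_set_ne hne]
            · simp [h0]
          · simp [List.getD, List.getElem?_set_self hilen]
          · intro m hm
            have hne : i ≠ m := by omega
            simpa [List.getD, List.getElem?_set_ne hne] using hzero m (by omega)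
      · -- other character: dp untouched, dp[i] = 0 so new cur is 0 on both sides
        simp only [loopA, altStep, if_neg hc1, if_neg hc2, List.foldl_cons]
        apply ih
        · omega
        · exact fun j hj => Nat.lt_succ_of_lt (hlt j hj)
        · exact hstk
        · simpa [List.getD] using (hzero i le_rfl).symm
        · exact fun m hm => hzero m (by omega)

-- ===== VERDICT (by name: the statement is the Claim_ definition above) =====
theorem run_example_spec : Claim_equal_run_example := by
  intro s _
  unfold Spec_run_example run_example run_example_alt
  apply loopA_eq_foldl
  · simp
  · simp
  · simp
  · simp
  · intro m _
    simp [List.getD, List.getElem?_replicate]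
    split <;> simp
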